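-- pv_equiv track=rewrite | github.com/AlbertoOS/paa-task-scheduler | main.py | compute_q
-- ===== SOURCE A (Python) =====
-- def compute_q(activities):
--     # Maior indice dos elementos compatíveis com a tarefa i
--     q = []
--     for activity in activities:
--         compatible_activities = [x for x in activities if x[1] <= activity[0]]
--         if not compatible_activities:
--             q.append(-1)  # Deve ser a primeira a para estar na seleção
--         else:
--             qj = max(compatible_activities, key=lambda x: activities.index(x))
--             qj = activities.index(qj)
--             q.append(qj)
--     return q
-- ===== SOURCE B (Python) =====
-- def compute_q(activities):
--     # Precompute the first-occurrence index (and finish time) of each distinct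
--     # activity once, then answer every query by a single scan over that list.
--     seen = set()
--     firsts = []  # (first-occurrence index, finish time), in increasing index order
--     for j, act in enumerate(activities):
--         if act not in seen:
--             seen.add(act)
--             firsts.append((j, act[1]))
--     q = []
--     for start, _ in activities:
--         best = -1
--         for j, f in firsts:
--             if f <= start:
--                 best = j
--         q.append(best)
--     return q
-- ===== Notes on version B (the rewrite author's own statement) =====
-- stated objective: faster
-- what changed: B precomputes the first-occurrence index of every distinct activity in one set-based pass, then answers each activity with a single scan over that deduplicated list keeping the last compatible index, instead of A's per-activity filter plus max keyed by repeated list.index calls.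
import Mathlib
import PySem

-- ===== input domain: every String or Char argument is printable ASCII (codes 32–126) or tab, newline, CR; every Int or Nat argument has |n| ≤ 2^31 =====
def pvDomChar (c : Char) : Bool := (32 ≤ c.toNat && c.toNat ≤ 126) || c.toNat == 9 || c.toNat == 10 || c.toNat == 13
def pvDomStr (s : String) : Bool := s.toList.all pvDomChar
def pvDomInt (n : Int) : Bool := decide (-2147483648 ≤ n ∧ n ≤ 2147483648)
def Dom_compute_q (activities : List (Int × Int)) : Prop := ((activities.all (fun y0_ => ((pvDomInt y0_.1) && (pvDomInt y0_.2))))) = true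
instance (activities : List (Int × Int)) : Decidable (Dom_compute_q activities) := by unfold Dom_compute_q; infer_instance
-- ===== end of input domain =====

-- B replaces A's per-activity filter + max keyed by repeated list.index calls by one
-- set-based first-occurrence pass and a single scan per activity (objective: faster).

-- ===== PORT A =====
-- activities.index(x) never fails here (x is drawn from activities), so .getD 0 is exact.
def compute_q (activities : List (Int × Int)) : List Int :=
  activities.foldl (fun q activity =>
    let compatible_activities := activities.filter (fun x => decide (x.2 ≤ activity.1))
    if compatible_activities.isEmpty then
      q ++ [-1]
    else
      match PySem.List.max? compatible_activities
          (fun x => (PySem.List.index? activities x).getD 0) with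
      | some qj => q ++ [(((PySem.List.index? activities qj).getD 0 : Nat) : Int)]
      | none => q ++ [-1]) []

-- ===== PORT B =====
def compute_q_alt (activities : List (Int × Int)) : List Int :=
  let firsts := ((PySem.List.enumerate activities 0).foldl
    (fun (st : PySem.Set (Int × Int) × List (Int × Int)) p =>
      if PySem.Set.contains st.1 p.2 then st
      else (PySem.Set.add st.1 p.2, st.2 ++ [(p.1, p.2.2)]))
    (PySem.Set.empty, [])).2
  activities.map (fun a =>
    firsts.foldl (fun best p => if p.2 ≤ a.1 then p.1 else best) (-1))

-- ===== PRECONDITION & SPEC =====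
def Spec_compute_q (activities : List (Int × Int)) (out : List Int) : Prop := out = compute_q_alt activities
instance (activities : List (Int × Int)) (out : List Int) : Decidable (Spec_compute_q activities out) := by unfold Spec_compute_q; infer_instance

-- ===== CLAIM (what is proved, stated in full; the proofs are below) =====
def Claim_equal_compute_q : Prop := ∀ (activities : List (Int × Int)), Dom_compute_q activities → Spec_compute_q activities (compute_q activities)

-- ===== LEMMAS AND PROOFS =====

-- A's per-activity value.
def aElem (acts : List (Int × Int)) (s : Int) : Int :=
  let comp := acts.filter (fun x => decide (x.2 ≤ s))
  if comp.isEmpty then -1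
  else
    match PySem.List.max? comp (fun x => (PySem.List.index? acts x).getD 0) with
    | some qj => (((PySem.List.index? acts qj).getD 0 : Nat) : Int)
    | none => -1

-- B's first-occurrence pass, as a structural recursion over the enumerated list.
def fgo (seen : PySem.Set (Int × Int)) : List (Int × (Int × Int)) → List (Int × Int)
  | [] => []
  | p :: t =>
    if PySem.Set.contains seen p.2 then fgo seen t
    else (p.1, p.2.2) :: fgo (PySem.Set.add seen p.2) t

lemma foldl_step_eq (l : List (Int × (Int × Int))) :
    ∀ (seen : PySem.Set (Int × Int)) (acc : List (Int × Int)),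
    (l.foldl (fun (st : PySem.Set (Int × Int) × List (Int × Int)) p =>
      if PySem.Set.contains st.1 p.2 then st
      else (PySem.Set.add st.1 p.2, st.2 ++ [(p.1, p.2.2)])) (seen, acc)).2
      = acc ++ fgo seen l := by
  induction l with
  | nil => intro seen acc; simp [fgo]
  | cons p t ih =>
    intro seen acc
    rw [List.foldl_cons]
    by_cases h : PySem.Set.contains seen p.2 = true
    · rw [if_pos h, ih]
      have hm : p.2 ∈ seen := by simpa using h
      simp [fgo, hm]
    · rw [if_neg h, ih]
      have hm : p.2 ∉ seen := fun hm => h (by simpa using hm)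
      simp [fgo, hm]

lemma drop_facts (acts0 : List (Int × Int)) (i : Nat) (x : Int × Int) (t : List (Int × Int))
    (hd : acts0.drop i = x :: t) :
    acts0.drop (i+1) = t ∧ acts0.take (i+1) = acts0.take i ++ [x] ∧ i < acts0.length := by
  have hlen : i < acts0.length := by
    by_contra h
    rw [List.drop_eq_nil_of_le (by omega)] at hd
    exact absurd hd (by simp)
  have hx : acts0[i]? = some x := by
    have : (List.drop i acts0)[0]? = acts0[i+0]? := List.getElem?_drop
    rw [hd] at this
    simpa using this.symm
  refine ⟨?_, ?_, hlen⟩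
  · have : List.drop 1 (List.drop i acts0) = List.drop (i+1) acts0 := by
      rw [List.drop_drop]
    rw [hd] at this
    simpa using this.symm
  · rw [List.take_add_one, hx]
    rfl

lemma idx_at (acts0 : List (Int × Int)) (i : Nat) (x : Int × Int) (t : List (Int × Int))
    (hd : acts0.drop i = x :: t) (hx : x ∉ acts0.take i) :
    PySem.List.index? acts0 x = some i := by
  rw [PySem.List.index?_eq_some_iff]
  refine ⟨acts0.take i, t, ?_, ?_, hx⟩
  · conv_lhs => rw [← List.take_append_drop i acts0]
    rw [hd]
  · have := (drop_facts acts0 i x t hd).2.2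
    simp [List.length_take]; omega

-- P1: every pair the pass emits is (first-occurrence index of some x, x.2).
lemma fgo_sound (acts0 : List (Int × Int)) :
    ∀ (rest : List (Int × Int)) (i : Nat) (seen : PySem.Set (Int × Int)),
    acts0.drop i = rest →
    (∀ y, y ∈ seen ↔ y ∈ acts0.take i) →
    ∀ q ∈ fgo seen (PySem.List.enumerate rest (i : Int)),
      ∃ (k : Nat) (x : Int × Int), q = ((k : Int), x.2) ∧ PySem.List.index? acts0 x = some k := by
  intro rest
  induction rest with
  | nil => intro i seen _ _ q hq; simp [PySem.List.enumerate_nil, fgo] at hq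
  | cons x t ih =>
    intro i seen hd hseen q hq
    obtain ⟨hdrop, htake, _⟩ := drop_facts acts0 i x t hd
    rw [PySem.List.enumerate_cons] at hq
    rw [show ((i : Int) + 1) = ((i+1 : Nat) : Int) by push_cast; ring] at hq
    by_cases hm : x ∈ seen
    · rw [show fgo seen (((i:Int), x) :: PySem.List.enumerate t ((i+1 : Nat):Int))
          = fgo seen (PySem.List.enumerate t ((i+1:Nat):Int)) by simp [fgo, hm]] at hq
      have hseen' : ∀ z, z ∈ seen ↔ z ∈ acts0.take (i+1) := by
        intro z
        rw [htake, List.mem_append, List.mem_singleton]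
        constructor
        · intro hz; exact Or.inl ((hseen z).mp hz)
        · rintro (hz | rfl)
          · exact (hseen z).mpr hz
          · exact hm
      exact ih (i+1) seen hdrop hseen' q hq
    · have hxs : x ∉ seen := hm
      rw [show fgo seen (((i:Int), x) :: PySem.List.enumerate t ((i+1 : Nat):Int))
          = ((i:Int), x.2) :: fgo (PySem.Set.add seen x) (PySem.List.enumerate t ((i+1:Nat):Int))
          by simp [fgo, hm]] at hq
      rcases List.mem_cons.mp hq with rfl | hq'
      · exact ⟨i, x, rfl, idx_at acts0 i x t hd (fun hm => hxs ((hseen x).mpr hm))⟩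
      · have hseen' : ∀ z, z ∈ PySem.Set.add seen x ↔ z ∈ acts0.take (i+1) := by
          intro z
          rw [PySem.Set.mem_add, htake, List.mem_append, List.mem_singleton]
          exact or_congr (hseen z) Iff.rfl
        exact ih (i+1) (PySem.Set.add seen x) hdrop hseen' q hq'

-- P2: every element's first-occurrence index appears in the pass output.
lemma fgo_complete (acts0 : List (Int × Int)) :
    ∀ (rest : List (Int × Int)) (i : Nat) (seen : PySem.Set (Int × Int)),
    acts0.drop i = rest →
    (∀ y, y ∈ seen ↔ y ∈ acts0.take i) →
    ∀ (x : Int × Int) (k : Nat), x ∈ rest → x ∉ seen →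
      PySem.List.index? acts0 x = some k →
      ((k : Int), x.2) ∈ fgo seen (PySem.List.enumerate rest (i : Int)) := by
  intro rest
  induction rest with
  | nil => intro i seen _ _ x k hx; simp at hx
  | cons y t ih =>
    intro i seen hd hseen x k hx hxs hidx
    obtain ⟨hdrop, htake, _⟩ := drop_facts acts0 i y t hd
    rw [PySem.List.enumerate_cons]
    rw [show ((i : Int) + 1) = ((i+1 : Nat) : Int) by push_cast; ring]
    by_cases hys : y ∈ seen
    · rw [show fgo seen (((i:Int), y) :: PySem.List.enumerate t ((i+1 : Nat):Int))
          = fgo seen (PySem.List.enumerate t ((i+1:Nat):Int)) by simp [fgo, hys]]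
      have hseen' : ∀ z, z ∈ seen ↔ z ∈ acts0.take (i+1) := by
        intro z
        rw [htake, List.mem_append, List.mem_singleton]
        constructor
        · intro hz; exact Or.inl ((hseen z).mp hz)
        · rintro (hz | rfl)
          · exact (hseen z).mpr hz
          · exact hys
      have hxt : x ∈ t := by
        rcases List.mem_cons.mp hx with rfl | h' 
        · exact absurd hys hxs
        · exact h'
      exact ih (i+1) seen hdrop hseen' x k hxt hxs hidx
    · rw [show fgo seen (((i:Int), y) :: PySem.List.enumerate t ((i+1 : Nat):Int))
          = ((i:Int), y.2) :: fgo (PySem.Set.add seen y) (PySem.List.enumerate t ((i+1:Nat):Int))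
          by simp [fgo, hys]]
      rcases List.mem_cons.mp hx with rfl | hxt
      · have : PySem.List.index? acts0 x = some i :=
          idx_at acts0 i x t hd (fun hm => hys ((hseen x).mpr hm))
        rw [hidx] at this
        have : k = i := by injection this
        subst this
        exact List.mem_cons_self
      · by_cases hxy : x = y
        · subst hxy
          have : PySem.List.index? acts0 x = some i :=
            idx_at acts0 i x t hd (fun hm => hys ((hseen x).mpr hm))
          rw [hidx] at this
          have : k = i := by injection this
          subst this
          exact List.mem_cons_self
        · have hseen' : ∀ z, z ∈ PySem.Set.add seen y ↔ z ∈ acts0.take (i+1) := by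
            intro z
            rw [PySem.Set.mem_add, htake, List.mem_append, List.mem_singleton]
            exact or_congr (hseen z) Iff.rfl
          have hxs' : x ∉ PySem.Set.add seen y := by
            rw [PySem.Set.mem_add]; rintro (h1 | h1)
            · exact hxs h1
            · exact hxy h1
          exact List.mem_cons_of_mem _ (ih (i+1) (PySem.Set.add seen y) hdrop hseen' x k hxt hxs' hidx)

-- P3: the emitted indices are ≥ i and strictly increasing.
lemma fgo_incr : ∀ (rest : List (Int × Int)) (i : Int) (seen : PySem.Set (Int × Int)),
    (∀ q ∈ fgo seen (PySem.List.enumerate rest i), i ≤ q.1) ∧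
    (fgo seen (PySem.List.enumerate rest i)).Pairwise (fun a b => a.1 < b.1) := by
  intro rest
  induction rest with
  | nil => intro i seen; simp [PySem.List.enumerate_nil, fgo]
  | cons x t ih =>
    intro i seen
    rw [PySem.List.enumerate_cons]
    by_cases h : x ∈ seen
    · rw [show fgo seen ((i, x) :: PySem.List.enumerate t (i+1)) = fgo seen (PySem.List.enumerate t (i+1)) by simp [fgo, h]]
      obtain ⟨h1, h2⟩ := ih (i+1) seen
      exact ⟨fun q hq => le_trans (by omega) (h1 q hq), h2⟩
    · rw [show fgo seen ((i, x) :: PySem.List.enumerate t (i+1)) = (i, x.2) :: fgo (PySem.Set.add seen x) (PySem.List.enumerate t (i+1)) by simp [fgo, h]]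
      obtain ⟨h1, h2⟩ := ih (i+1) (PySem.Set.add seen x)
      constructor
      · intro q hq
        rcases List.mem_cons.mp hq with rfl | hq
        · simp
        · exact le_trans (by omega) (h1 q hq)
      · exact List.pairwise_cons.mpr ⟨fun q hq => by have := h1 q hq; simp; omega, h2⟩

-- the "keep the last compatible index" scan on a strictly increasing list computes the max.
lemma lastMatch (s : Int) : ∀ (L : List (Int × Int)),
    L.Pairwise (fun a b => a.1 < b.1) →
    (∀ p ∈ L, p.2 ≤ s →
      p.1 ≤ L.foldl (fun best p => if p.2 ≤ s then p.1 else best) (-1)) ∧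
    (L.foldl (fun best p => if p.2 ≤ s then p.1 else best) (-1) = -1 ∨
      ∃ p ∈ L, p.2 ≤ s ∧ p.1 = L.foldl (fun best p => if p.2 ≤ s then p.1 else best) (-1)) := by
  intro L
  induction L using List.reverseRecOn with
  | nil => simp
  | append_singleton L q ih =>
    intro hp
    have hpL : L.Pairwise (fun a b => a.1 < b.1) := (List.pairwise_append.mp hp).1
    have hlt : ∀ a ∈ L, a.1 < q.1 := fun a ha =>
      (List.pairwise_append.mp hp).2.2 a ha q (List.mem_singleton_self q)
    obtain ⟨ih1, ih2⟩ := ih hpL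
    rw [List.foldl_append]
    simp only [List.foldl_cons, List.foldl_nil]
    by_cases hq : q.2 ≤ s
    · rw [if_pos hq]
      constructor
      · intro p hp' hps
        rcases List.mem_append.mp hp' with h | h
        · exact le_of_lt (hlt p h)
        · simp at h; subst h; exact le_refl _
      · right; exact ⟨q, by simp, hq, rfl⟩
    · rw [if_neg hq]
      constructor
      · intro p hp' hps
        rcases List.mem_append.mp hp' with h | h
        · exact ih1 p h hps
        · simp at h; subst h; exact absurd hps hq
      · rcases ih2 with h | ⟨p, hm, h1, h2⟩
        · left; exact h
        · right; exact ⟨p, List.mem_append_left _ hm, h1, h2⟩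

lemma elem_eq (acts : List (Int × Int)) (s : Int) :
    aElem acts s
      = (fgo PySem.Set.empty (PySem.List.enumerate acts 0)).foldl
          (fun best p => if p.2 ≤ s then p.1 else best) (-1) := by
  have hcast : PySem.List.enumerate acts ((0:Nat) : Int) = PySem.List.enumerate acts 0 := by
    norm_num
  have hinv : ∀ y, y ∈ (PySem.Set.empty : PySem.Set (Int × Int)) ↔ y ∈ acts.take 0 := by
    simp [PySem.Set.empty]
  have hsound := fgo_sound acts acts 0 PySem.Set.empty (by simp) hinv
  have hcomplete := fgo_complete acts acts 0 PySem.Set.empty (by simp) hinv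
  rw [hcast] at hsound hcomplete
  obtain ⟨hub, hdisj⟩ := lastMatch s _ (fgo_incr acts 0 PySem.Set.empty).2
  unfold aElem
  by_cases hc : (acts.filter (fun x => decide (x.2 ≤ s))).isEmpty
  · rw [if_pos hc]  -- hmm, `simp only`?
    rcases hdisj with h | ⟨p, hpF, hps, hpr⟩
    · exact h.symm
    · exfalso
      obtain ⟨k, x, hpe, hidx⟩ := hsound p hpF
      obtain ⟨hlt, hget, -⟩ := PySem.List.getElem_of_index?_eq_some hidx
      have hxa : x ∈ acts := hget ▸ List.getElem_mem hlt
      have hxs : x.2 ≤ s := by rw [hpe] at hps; simpa using hps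
      have hxc : x ∈ acts.filter (fun x => decide (x.2 ≤ s)) :=
        List.mem_filter.mpr ⟨hxa, by simpa⟩
      rw [List.isEmpty_iff] at hc
      rw [hc] at hxc
      exact absurd hxc (List.not_mem_nil)
  · rw [if_neg hc]
    have hne : acts.filter (fun x => decide (x.2 ≤ s)) ≠ [] := by
      simpa [List.isEmpty_iff] using hc
    cases hmax : PySem.List.max? (acts.filter (fun x => decide (x.2 ≤ s)))
        (fun x => (PySem.List.index? acts x).getD 0) with
    | none =>
      rw [PySem.List.max?_eq_none_iff] at hmax
      exact absurd hmax hne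
    | some m =>
      have hmc : m ∈ acts.filter (fun x => decide (x.2 ≤ s)) := PySem.List.max?_mem hmax
      have hma : m ∈ acts := (List.mem_filter.mp hmc).1
      have hms : m.2 ≤ s := by simpa using (List.mem_filter.mp hmc).2
      obtain ⟨k, hk⟩ : ∃ k, PySem.List.index? acts m = some k := by
        have := PySem.List.index?_isSome_iff (xs := acts) (v := m)
        rcases h' : PySem.List.index? acts m with _ | k
        · rw [h'] at this; simp at this; exact absurd hma (by simpa using this)
        · exact ⟨k, rfl⟩
      show (((PySem.List.index? acts m).getD 0 : Nat) : Int) = _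
      rw [hk]
      simp only [Option.getD_some]
      have hmemF : ((k:Int), m.2) ∈ fgo PySem.Set.empty (PySem.List.enumerate acts 0) :=
        hcomplete m k hma (by simp [PySem.Set.empty]) hk
      have h1 := hub _ hmemF hms
      rcases hdisj with h | ⟨p, hpF, hps, hpr⟩
      · rw [h] at h1; omega
      · obtain ⟨j, x, hpe, hjidx⟩ := hsound p hpF
        obtain ⟨hlt, hget, -⟩ := PySem.List.getElem_of_index?_eq_some hjidx
        have hxa : x ∈ acts := hget ▸ List.getElem_mem hlt
        have hxs : x.2 ≤ s := by rw [hpe] at hps; simpa using hps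
        have hxc : x ∈ acts.filter (fun x => decide (x.2 ≤ s)) :=
          List.mem_filter.mpr ⟨hxa, by simpa⟩
        have hle := PySem.List.max?_isMax hmax x hxc
        simp only [hjidx, hk, Option.getD_some] at hle
        rw [hpe] at hpr
        simp only at hpr
        omega

lemma compute_q_eq_map (acts : List (Int × Int)) :
    compute_q acts = acts.map (fun a => aElem acts a.1) := by
  unfold compute_q
  rw [show (fun (q : List Int) (activity : Int × Int) =>
      let compatible_activities := acts.filter (fun x => decide (x.2 ≤ activity.1))
      if compatible_activities.isEmpty then q ++ [-1]
      else
        match PySem.List.max? compatible_activities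
            (fun x => (PySem.List.index? acts x).getD 0) with
        | some qj => q ++ [(((PySem.List.index? acts qj).getD 0 : Nat) : Int)]
        | none => q ++ [-1])
      = fun (q : List Int) (activity : Int × Int) => q ++ [aElem acts activity.1] by
    funext q a
    unfold aElem
    by_cases hc : (acts.filter (fun x => decide (x.2 ≤ a.1))).isEmpty
    · simp [hc]
    · simp only [hc, if_false, Bool.false_eq_true]
      cases PySem.List.max? (acts.filter (fun x => decide (x.2 ≤ a.1)))
          (fun x => (PySem.List.index? acts x).getD 0) <;> rfl]
  rw [PySem.List.foldl_append_singleton_eq_map (fun (a : Int × Int) => aElem acts a.1) acts []]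
  simp

-- ===== VERDICT (by name: the statement is the Claim_ definition above) =====
theorem compute_q_spec : Claim_equal_compute_q := by
  intro acts _
  unfold Spec_compute_q compute_q_alt
  rw [compute_q_eq_map, foldl_step_eq]
  simp only [List.nil_append]
  exact List.map_congr_left (fun a _ => elem_eq acts a.1)
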